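-- pv_equiv track=rewrite | github.com/Josecopro/EstructurasDeDatos | src/gptaso.py | find_largest_sum_matrix
-- ===== SOURCE A (Python) =====
-- def count_elements(matrix):
--     if not matrix:
--         return 0
--     if isinstance(matrix[0], list):
--         return count_elements(matrix[0]) + count_elements(matrix[1:])
--     return matrix[0] + count_elements(matrix[1:])
--
-- def find_largest_sum_matrix(matrices):
--     max_sum = -1
--     largest_matrix = None
--     for matrix in matrices:
--         current_sum = count_elements(matrix)
--         if current_sum > max_sum:
--             max_sum = current_sum
--             largest_matrix = matrix
--     return largest_matrix
-- ===== SOURCE B (Python) =====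
-- def find_largest_sum_matrix(matrices):
--     max_sum = -1
--     largest_matrix = None
--     for matrix in matrices:
--         total = 0
--         stack = [matrix]
--         while stack:
--             item = stack.pop()
--             if isinstance(item, list):
--                 stack.extend(item)
--             else:
--                 total += item
--         if total > max_sum:
--             max_sum = total
--             largest_matrix = matrix
--     return largest_matrix
-- ===== Notes on version B (the rewrite author's own statement) =====
-- stated objective: alternative
-- what changed: The recursive count_elements (recursion over matrix[0]/matrix[1:] with O(n^2) slice copying) is replaced by an iterative explicit-stack worklist that pops items, pushes list contents and accumulates numbers; the outer selection loop keeps A's -1/None initialization and strict comparison.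
import Mathlib
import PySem

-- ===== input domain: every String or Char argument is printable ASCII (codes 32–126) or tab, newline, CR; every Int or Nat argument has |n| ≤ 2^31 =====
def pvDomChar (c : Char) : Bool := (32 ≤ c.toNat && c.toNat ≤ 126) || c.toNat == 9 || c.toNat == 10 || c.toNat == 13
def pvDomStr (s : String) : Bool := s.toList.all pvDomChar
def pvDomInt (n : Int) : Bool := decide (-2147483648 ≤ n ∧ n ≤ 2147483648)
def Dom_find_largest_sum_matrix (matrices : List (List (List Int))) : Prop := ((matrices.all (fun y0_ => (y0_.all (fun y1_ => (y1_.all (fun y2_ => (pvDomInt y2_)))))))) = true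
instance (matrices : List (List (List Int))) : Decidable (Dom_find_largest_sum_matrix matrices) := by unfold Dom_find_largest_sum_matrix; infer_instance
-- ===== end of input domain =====

-- B replaces A's recursive element-count with an iterative explicit-stack worklist (alternative decomposition, same cost); outer selection loop unchanged.

-- ===== PORT A =====
-- count_elements specialized to the two nesting levels the input type has:
-- on a row (List Int) the first branch of the isinstance test is never taken,
-- on a matrix (List (List Int)) it always is.
def pvCountRow : List Int → Int
  | [] => 0
  | x :: xs => x + pvCountRow xs

def pvCountMat : List (List Int) → Int
  | [] => 0
  | r :: rs => pvCountRow r + pvCountMat rs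

def find_largest_sum_matrix (matrices : List (List (List Int))) : Option (List (List Int)) :=
  (matrices.foldl
    (fun (st : Int × Option (List (List Int))) matrix =>
      let current_sum := pvCountMat matrix
      if current_sum > st.1 then (current_sum, some matrix) else st)
    (-1, none)).2

-- ===== PORT B =====
-- worklist items: a whole matrix, a row, or a number (Python's heterogeneous stack)
inductive PvItem where
  | mat : List (List Int) → PvItem
  | row : List Int → PvItem
  | num : Int → PvItem
deriving DecidableEq, Repr

def pvISize : PvItem → Nat
  | .num _ => 1
  | .row r => r.length + 1
  | .mat m => (m.map (fun r => r.length + 1)).sum + 1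

-- while stack: pop the top; a list pushes its contents (reversed, since Python
-- pops from the end after extend), a number is added to the accumulator.
def pvSumWork : List PvItem → Int → Int
  | [], acc => acc
  | .mat m :: rest, acc => pvSumWork ((m.reverse.map PvItem.row) ++ rest) acc
  | .row r :: rest, acc => pvSumWork ((r.reverse.map PvItem.num) ++ rest) acc
  | .num x :: rest, acc => pvSumWork rest (acc + x)
termination_by stack _ => (stack.map pvISize).sum
decreasing_by
  · simp [List.map_map, Function.comp_def, pvISize]
  · simp [List.map_map, Function.comp_def, pvISize]
  · simp [pvISize]

def find_largest_sum_matrix_alt (matrices : List (List (List Int))) : Option (List (List Int)) :=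
  (matrices.foldl
    (fun (st : Int × Option (List (List Int))) matrix =>
      let total := pvSumWork [PvItem.mat matrix] 0
      if total > st.1 then (total, some matrix) else st)
    (-1, none)).2

-- ===== PRECONDITION & SPEC =====
def Spec_find_largest_sum_matrix (matrices : List (List (List Int))) (out : Option (List (List Int))) : Prop := out = find_largest_sum_matrix_alt matrices
instance (matrices : List (List (List Int))) (out : Option (List (List Int))) : Decidable (Spec_find_largest_sum_matrix matrices out) := by unfold Spec_find_largest_sum_matrix; infer_instance

-- ===== CLAIM (what is proved, stated in full; the proofs are below) =====
def Claim_equal_find_largest_sum_matrix : Prop := ∀ (matrices : List (List (List Int))), Dom_find_largest_sum_matrix matrices → Spec_find_largest_sum_matrix matrices (find_largest_sum_matrix matrices)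

-- ===== LEMMAS AND PROOFS =====
-- sizes of the item lists pushed by pvSumWork (used in pvSumWork_eq_aux's bound arithmetic)
theorem pvSize_row_stack (m : List (List Int)) :
    ((m.map PvItem.row).map pvISize).sum = (m.map (fun r => r.length + 1)).sum := by
  simp [List.map_map, Function.comp_def, pvISize]

theorem pvSize_num_stack (r : List Int) :
    ((r.map PvItem.num).map pvISize).sum = r.length := by
  induction r with
  | nil => rfl
  | cons x xs ih =>
      simp only [List.map_cons, List.sum_cons, List.length_cons, ih, pvISize]
      omega

def pvIVal : PvItem → Int
  | .num x => x
  | .row r => pvCountRow r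
  | .mat m => pvCountMat m

theorem pvCountRow_eq (r : List Int) : pvCountRow r = r.sum := by
  induction r with
  | nil => simp [pvCountRow]
  | cons x xs ih => simp [pvCountRow, ih]

theorem pvCountMat_eq (m : List (List Int)) : pvCountMat m = (m.map pvCountRow).sum := by
  induction m with
  | nil => simp [pvCountMat]
  | cons r rs ih => simp [pvCountMat, ih]

theorem pvSumWork_eq_aux (n : Nat) :
    ∀ (l : List PvItem) (acc : Int), (l.map pvISize).sum ≤ n →
      pvSumWork l acc = acc + (l.map pvIVal).sum := by
  induction n with
  | zero =>
      intro l acc h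
      match l with
      | [] => simp [pvSumWork]
      | i :: rest => exfalso; cases i <;> simp [pvISize] at h
  | succ n ih =>
      intro l acc h
      match l with
      | [] => simp [pvSumWork]
      | .mat m :: rest =>
          rw [pvSumWork, ih _ _ (by
            simp only [List.map_append, List.sum_append, List.map_reverse, List.sum_reverse,
              pvSize_row_stack, List.map_cons, List.sum_cons, pvISize] at h ⊢
            omega)]
          simp [List.map_map, Function.comp_def, pvIVal, pvCountMat_eq]
      | .row r :: rest =>
          rw [pvSumWork, ih _ _ (by
            simp only [List.map_append, List.sum_append, List.map_reverse, List.sum_reverse,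
              pvSize_num_stack, List.map_cons, List.sum_cons, pvISize] at h ⊢
            omega)]
          simp [List.map_map, Function.comp_def, pvIVal, pvCountRow_eq]
      | .num x :: rest =>
          rw [pvSumWork, ih _ _ (by simp [pvISize] at h ⊢; omega)]
          simp [pvIVal]
          ring

theorem pvSumWork_eq (l : List PvItem) (acc : Int) :
    pvSumWork l acc = acc + (l.map pvIVal).sum :=
  pvSumWork_eq_aux (l.map pvISize).sum l acc le_rfl

theorem pvSumWork_mat (m : List (List Int)) : pvSumWork [PvItem.mat m] 0 = pvCountMat m := by
  simp [pvSumWork_eq, pvIVal]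

theorem pvFold_eq (matrices : List (List (List Int))) (st : Int × Option (List (List Int))) :
    matrices.foldl
      (fun (st : Int × Option (List (List Int))) matrix =>
        let current_sum := pvCountMat matrix
        if current_sum > st.1 then (current_sum, some matrix) else st) st
    = matrices.foldl
      (fun (st : Int × Option (List (List Int))) matrix =>
        let total := pvSumWork [PvItem.mat matrix] 0
        if total > st.1 then (total, some matrix) else st) st := by
  induction matrices generalizing st with
  | nil => rfl
  | cons m ms ih => simp only [List.foldl, pvSumWork_mat]

-- ===== VERDICT (by name: the statement is the Claim_ definition above) =====
theorem find_largest_sum_matrix_spec : Claim_equal_find_largest_sum_matrix := by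
  intro matrices _
  unfold Spec_find_largest_sum_matrix find_largest_sum_matrix find_largest_sum_matrix_alt
  rw [pvFold_eq]
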